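-- pv_equiv track=rewrite | github.com/natelson/codes_python_interview | mathematic_questions/kthdigit.py | k_digit_only_number
-- ===== SOURCE A (Python) =====
-- def k_digit_only_number(a, b, k):
--     result = a ** b
--     temp = 0
--     while(k >0):
--         temp = result%10
--         result = result//10
--         k-=1
--     return temp
-- ===== SOURCE B (Python) =====
-- def k_digit_only_number(a, b, k):
--     if k <= 0:
--         return 0
--     return pow(a, b, 10 ** k) // 10 ** (k - 1)
-- ===== Notes on version B (the rewrite author's own statement) =====
-- stated objective: faster
-- what changed: Replaces computing the full huge power a**b and stripping k digits in a loop by modular exponentiation pow(a,b,10**k) followed by one floor division to extract the k-th digit.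
-- outside the precondition, e.g. on k_digit_only_number(2, -1, 1): A returns 0.5, B raises ValueError
import Mathlib
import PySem

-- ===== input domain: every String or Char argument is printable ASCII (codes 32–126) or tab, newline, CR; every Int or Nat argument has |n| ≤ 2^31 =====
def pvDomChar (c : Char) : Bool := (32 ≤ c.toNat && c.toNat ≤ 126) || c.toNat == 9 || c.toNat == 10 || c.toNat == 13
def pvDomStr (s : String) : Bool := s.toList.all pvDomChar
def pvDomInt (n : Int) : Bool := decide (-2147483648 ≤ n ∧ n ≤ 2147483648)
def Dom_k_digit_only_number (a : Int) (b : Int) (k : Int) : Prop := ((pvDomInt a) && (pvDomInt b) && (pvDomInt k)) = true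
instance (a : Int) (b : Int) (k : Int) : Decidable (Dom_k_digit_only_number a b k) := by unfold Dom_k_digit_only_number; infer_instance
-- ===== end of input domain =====

-- B replaces the full huge power a**b and a k-step digit-stripping loop by modular
-- exponentiation pow(a, b, 10**k) and one floor division (objective: faster).

-- ===== PORT A =====
-- while(k > 0): temp = result % 10; result = result // 10; k -= 1   (k is a counter: recursion on k.toNat)
def kDigitLoopA : Nat → Int → Int → Int
  | 0, _result, temp => temp
  | Nat.succ n, result, _temp =>
      kDigitLoopA n (PySem.Int.floordiv result 10) (PySem.Int.mod result 10)

def k_digit_only_number (a : Int) (b : Int) (k : Int) : Int :=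
  kDigitLoopA k.toNat (a ^ b.toNat) 0

-- ===== PORT B =====
def k_digit_only_number_alt (a : Int) (b : Int) (k : Int) : Int :=
  if k ≤ 0 then 0
  else PySem.Int.floordiv (PySem.Int.powMod a b.toNat (10 ^ k.toNat)) (10 ^ (k - 1).toNat)

-- ===== PRECONDITION & SPEC =====
-- Pre_ excludes b < 0, where Python's a ** b is a float (not an int; ZeroDivisionError for a = 0).
def Pre_k_digit_only_number (a : Int) (b : Int) (k : Int) : Prop := 0 ≤ b
instance (a : Int) (b : Int) (k : Int) : Decidable (Pre_k_digit_only_number a b k) := by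
  unfold Pre_k_digit_only_number; infer_instance
def pvWitness_k_digit_only_number : Int × Int × Int := (7, 5, 3)

def Spec_k_digit_only_number (a : Int) (b : Int) (k : Int) (out : Int) : Prop := out = k_digit_only_number_alt a b k
instance (a : Int) (b : Int) (k : Int) (out : Int) : Decidable (Spec_k_digit_only_number a b k out) := by unfold Spec_k_digit_only_number; infer_instance

-- ===== CLAIM (what is proved, stated in full; the proofs are below) =====
def Claim_equal_k_digit_only_number : Prop := ∀ (a : Int) (b : Int) (k : Int), Dom_k_digit_only_number a b k → Pre_k_digit_only_number a b k → Spec_k_digit_only_number a b k (k_digit_only_number a b k)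

-- ===== LEMMAS AND PROOFS =====

-- After n+1 iterations starting from x, temp is the (n+1)-th digit: (x // 10^n) % 10.
theorem kDigitLoopA_succ (n : Nat) (x t : Int) :
    kDigitLoopA (n + 1) x t = PySem.Int.mod (PySem.Int.floordiv x (10 ^ n)) 10 := by
  induction n generalizing x t with
  | zero => simp [kDigitLoopA]
  | succ n ih =>
      show kDigitLoopA (n + 1) (PySem.Int.floordiv x 10) (PySem.Int.mod x 10) = _
      rw [ih]
      rw [PySem.Int.floordiv_eq_ediv_of_pos (a := x) (by norm_num),
          PySem.Int.floordiv_eq_ediv_of_pos (a := x / 10) (b := (10:Int) ^ n) (by positivity),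
          PySem.Int.floordiv_eq_ediv_of_pos (a := x) (b := (10:Int) ^ (n+1)) (by positivity)]
      rw [Int.ediv_ediv_of_nonneg (by norm_num : (0:Int) ≤ 10)]
      ring_nf

-- digit-extraction identity: (x // m) % 10 = (x % (10 * m)) // m for m = 10^n > 0 (ediv/emod)
theorem digit_mod_div (n : Nat) (x : Int) :
    (x / (10 ^ n : Int)) % 10 = (x % (10 * 10 ^ n)) / (10 ^ n : Int) := by
  have hm : (0:Int) < 10 ^ n := by positivity
  have h1 : x % (10 * 10 ^ n) = x - 10 * 10 ^ n * (x / (10 * 10 ^ n)) := Int.emod_def x _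
  have h2 : (x / (10 ^ n : Int)) % 10 = x / 10 ^ n - 10 * (x / 10 ^ n / 10) := Int.emod_def _ 10
  have h3 : x / 10 ^ n / 10 = x / (10 ^ n * 10) := Int.ediv_ediv_of_nonneg (by positivity)
  have h4 : (x - 10 * 10 ^ n * (x / (10 * 10 ^ n))) / (10 ^ n : Int)
      = x / 10 ^ n - 10 * (x / (10 * 10 ^ n)) := by
    have := Int.add_mul_ediv_right x (-(10 * (x / (10 * 10 ^ n)))) (ne_of_gt hm)
    calc (x - 10 * 10 ^ n * (x / (10 * 10 ^ n))) / (10 ^ n : Int)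
        = (x + (-(10 * (x / (10 * 10 ^ n)))) * 10 ^ n) / (10 ^ n : Int) := by ring_nf
      _ = x / 10 ^ n + (-(10 * (x / (10 * 10 ^ n)))) := this
      _ = x / 10 ^ n - 10 * (x / (10 * 10 ^ n)) := by ring
  rw [h1, h4, h2, h3, mul_comm (10 ^ n : Int) 10]

theorem k_digit_eq (a b k : Int) :
    k_digit_only_number a b k = k_digit_only_number_alt a b k := by
  unfold k_digit_only_number k_digit_only_number_alt
  by_cases hk : k ≤ 0
  · have : k.toNat = 0 := Int.toNat_of_nonpos hk
    simp [this, kDigitLoopA, hk]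
  · have hk1 : (1:Int) ≤ k := by omega
    have hn : k.toNat = (k - 1).toNat + 1 := by omega
    rw [hn, kDigitLoopA_succ, if_neg hk]
    set n := (k - 1).toNat with hndef
    set x := a ^ b.toNat with hxdef
    rw [PySem.Int.powMod]
    rw [PySem.Int.floordiv_eq_ediv_of_pos (a := x) (b := (10:Int) ^ n) (by positivity),
        PySem.Int.mod_eq_emod_of_pos (a := x / 10 ^ n) (b := (10:Int)) (by norm_num),
        PySem.Int.mod_eq_emod_of_pos (b := (10:Int) ^ (n + 1)) (by positivity),
        PySem.Int.floordiv_eq_ediv_of_pos (b := (10:Int) ^ n) (by positivity)]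
    have h : (10:Int) ^ (n + 1) = 10 * 10 ^ n := by rw [pow_succ]; ring
    rw [h]
    exact digit_mod_div n x

-- ===== VERDICT (by name: the statement is the Claim_ definition above) =====
theorem k_digit_only_number_spec : Claim_equal_k_digit_only_number := by
  intro a b k _ _
  exact k_digit_eq a b k
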